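-- pv_equiv track=rewrite | github.com/nvnsudharsan/SOLWEIG-GPU | TILESLICING_SOLWEIG/solweig_gpu/tiling.py | grid_slices
-- ===== SOURCE A (Python) =====
-- from typing import List, Sequence, Tuple
--
-- Slice = Tuple[int, int]
--
-- def grid_slices(n: int, parts: int) -> List[Slice]:
--     base = n // parts
--     rem = n % parts
--     sizes = [base + (1 if i < rem else 0) for i in range(parts)]
--     offsets = [0]
--     for s in sizes[:-1]:
--         offsets.append(offsets[-1] + s)
--     spans = [(offsets[i], offsets[i] + sizes[i]) for i in range(parts)]
--     return spans
-- ===== SOURCE B (Python) =====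
-- def grid_slices(n: int, parts: int):
--     base, rem = divmod(n, parts)
--
--     def bound(i: int) -> int:
--         return i * base + min(i, rem)
--
--     return [(bound(i), bound(i + 1)) for i in range(parts)]
-- ===== Notes on version B (the rewrite author's own statement) =====
-- stated objective: simpler
-- what changed: Each slice boundary is computed in closed form as bound(i) = i*base + min(i, rem), so the intermediate sizes list and the running-offset accumulation loop disappear; Pre_ excludes parts == 0, where A raises ZeroDivisionError.
import Mathlib
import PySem

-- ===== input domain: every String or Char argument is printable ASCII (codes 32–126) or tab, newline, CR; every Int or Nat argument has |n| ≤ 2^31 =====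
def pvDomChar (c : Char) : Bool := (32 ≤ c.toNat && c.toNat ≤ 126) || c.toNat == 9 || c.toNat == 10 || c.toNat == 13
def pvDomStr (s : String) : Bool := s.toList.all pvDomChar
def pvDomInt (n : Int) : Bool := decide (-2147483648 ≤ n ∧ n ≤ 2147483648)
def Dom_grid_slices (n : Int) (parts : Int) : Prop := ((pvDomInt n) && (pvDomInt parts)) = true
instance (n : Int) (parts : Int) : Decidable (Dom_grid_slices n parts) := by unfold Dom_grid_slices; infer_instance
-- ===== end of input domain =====

-- B replaces A's sizes list + running-offset loop by the closed-form boundary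
-- bound(i) = i*base + min(i, rem); objective: simpler.

-- ===== PORT A =====
def grid_slices (n : Int) (parts : Int) : List (Int × Int) :=
  let base := PySem.Int.floordiv n parts
  let rem := PySem.Int.mod n parts
  let sizes := (PySem.List.pyRange 0 parts 1).map (fun i => base + (if i < rem then 1 else 0))
  let offsets := (PySem.List.slice sizes none (some (-1))).foldl
    (fun acc s => acc ++ [PySem.List.pyGetD acc (-1) 0 + s]) [0]
  (PySem.List.pyRange 0 parts 1).map
    (fun i => (PySem.List.pyGetD offsets i 0,
               PySem.List.pyGetD offsets i 0 + PySem.List.pyGetD sizes i 0))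

-- ===== PORT B =====
def grid_slices_alt (n : Int) (parts : Int) : List (Int × Int) :=
  let base := PySem.Int.floordiv n parts
  let rem := PySem.Int.mod n parts
  let bound := fun (i : Int) => i * base + min i rem
  (PySem.List.pyRange 0 parts 1).map (fun i => (bound i, bound (i + 1)))

-- ===== PRECONDITION & SPEC =====
-- parts = 0 is excluded: Python's '//' and '%' raise ZeroDivisionError there (B raises too).
def Pre_grid_slices (n : Int) (parts : Int) : Prop := parts ≠ 0
instance (n : Int) (parts : Int) : Decidable (Pre_grid_slices n parts) := by unfold Pre_grid_slices; infer_instance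
def pvWitness_grid_slices : Int × Int := (10, 3)

def Spec_grid_slices (n : Int) (parts : Int) (out : List (Int × Int)) : Prop := out = grid_slices_alt n parts
instance (n : Int) (parts : Int) (out : List (Int × Int)) : Decidable (Spec_grid_slices n parts out) := by unfold Spec_grid_slices; infer_instance

-- ===== CLAIM (what is proved, stated in full; the proofs are below) =====
def Claim_equal_grid_slices : Prop := ∀ (n : Int) (parts : Int), Dom_grid_slices n parts → Pre_grid_slices n parts → Spec_grid_slices n parts (grid_slices n parts)

-- ===== LEMMAS AND PROOFS =====

-- running prefix sums started at c (what A's offsets loop appends)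
def pvPsums (c : Int) : List Int → List Int
  | [] => []
  | s :: ys => (c + s) :: pvPsums (c + s) ys

lemma pvFoldl_offsets (ys acc : List Int) (c : Int)
    (h : PySem.List.pyGetD acc (-1) 0 = c) :
    ys.foldl (fun acc s => acc ++ [PySem.List.pyGetD acc (-1) 0 + s]) acc
      = acc ++ pvPsums c ys := by
  induction ys generalizing acc c with
  | nil => simp [pvPsums]
  | cons s ys ih =>
      simp only [List.foldl_cons, pvPsums, h]
      rw [ih (acc ++ [c + s]) (c + s) (PySem.List.pyGetD_neg_one_append_singleton acc (c + s) 0)]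
      simp

lemma pvBound_step (base rem : Int) (a c : Int) (hc : c = a * base + min a rem) :
    c + (base + (if a < rem then 1 else 0)) = (a + 1) * base + min (a + 1) rem := by
  subst hc
  have hmul : (a + 1) * base = a * base + base := by ring
  rw [hmul]
  generalize a * base = t
  split_ifs with h <;> omega

lemma pvPsums_range (base rem : Int) :
    ∀ (m : Nat) (a c : Int), c = a * base + min a rem →
    pvPsums c ((PySem.List.pyRange a (a + m) 1).map (fun i => base + (if i < rem then 1 else 0)))
      = (PySem.List.pyRange (a + 1) (a + m + 1) 1).map (fun i => i * base + min i rem) := by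
  intro m
  induction m with
  | zero =>
      intro a c _
      rw [PySem.List.pyRange_one_eq_nil (by omega), PySem.List.pyRange_one_eq_nil (by omega)]
      simp [pvPsums]
  | succ m ih =>
      intro a c hc
      have e1 : a + ((m + 1 : Nat) : Int) = (a + 1) + (m : Int) := by push_cast; ring
      rw [e1, PySem.List.pyRange_one_cons (show a < a + 1 + (m : Int) by omega)]
      rw [PySem.List.pyRange_one_cons (show a + 1 < a + 1 + (m : Int) + 1 by omega)]
      simp only [List.map_cons, pvPsums]
      refine List.cons_eq_cons.mpr ⟨pvBound_step base rem a c hc, ?_⟩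
      exact ih (a + 1) _ (pvBound_step base rem a c hc)

lemma pvOffsets_eq (n parts : Int) (hp : 0 < parts) :
    ((PySem.List.slice ((PySem.List.pyRange 0 parts 1).map
        (fun i => PySem.Int.floordiv n parts + (if i < PySem.Int.mod n parts then 1 else 0)))
        none (some (-1))).foldl
      (fun acc s => acc ++ [PySem.List.pyGetD acc (-1) 0 + s]) [0])
    = (PySem.List.pyRange 0 parts 1).map
        (fun i => i * PySem.Int.floordiv n parts + min i (PySem.Int.mod n parts)) := by
  set base := PySem.Int.floordiv n parts with hbase
  set rem := PySem.Int.mod n parts with hrem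
  have hrem0 : 0 ≤ rem := PySem.Int.mod_nonneg n hp
  have hsplit := PySem.List.pyRange_one_succ_right (a := 0) (b := parts - 1) (by omega)
  rw [show parts - 1 + 1 = parts by ring] at hsplit
  have hdrop : PySem.List.slice ((PySem.List.pyRange 0 parts 1).map
        (fun i => base + (if i < rem then 1 else 0))) none (some (-1))
      = (PySem.List.pyRange 0 (parts - 1) 1).map (fun i => base + (if i < rem then 1 else 0)) := by
    rw [PySem.List.slice_to_neg_one, hsplit]
    simp
  rw [hdrop, pvFoldl_offsets _ [0] 0 (by decide)]
  have hps := pvPsums_range base rem (parts - 1).toNat 0 0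
    (by simp [min_eq_left hrem0])
  have hcast : (((parts - 1).toNat : Nat) : Int) = parts - 1 := by omega
  simp only [zero_add, hcast] at hps
  rw [show parts - 1 + 1 = parts by ring] at hps
  rw [hps, PySem.List.pyRange_one_cons hp]
  simp [min_eq_left hrem0]

-- ===== VERDICT (by name: the statement is the Claim_ definition above) =====
theorem grid_slices_spec : Claim_equal_grid_slices := by
  intro n parts _ hpre
  unfold Spec_grid_slices grid_slices grid_slices_alt
  by_cases hp : 0 < parts
  · simp only []
    rw [pvOffsets_eq n parts hp]
    apply List.map_congr_left
    intro i hi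
    rw [PySem.List.mem_pyRange_one] at hi
    rw [PySem.List.pyGetD_map_pyRange_of_nonneg _ parts i 0 hi.1 hi.2,
        PySem.List.pyGetD_map_pyRange_of_nonneg _ parts i 0 hi.1 hi.2]
    refine Prod.ext rfl ?_
    exact pvBound_step (PySem.Int.floordiv n parts) (PySem.Int.mod n parts) i _ rfl
  · rw [PySem.List.pyRange_one_eq_nil (by omega : parts ≤ (0:Int))]
    simp
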